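-- pv_equiv track=rewrite | github.com/DAMIANSEGUIN/wimd-railway-deploy | api/domain_adjacent_search.py | _generate_learning_paths
-- ===== SOURCE A (Python) =====
-- from typing import Any, Dict, List
--
-- def _generate_learning_paths(skill_gaps: List[str], cluster_name: str) -> List[str]:
--     """Generate learning paths for skill gaps."""
--     learning_paths = []
--
--     for skill in skill_gaps[:3]:  # Top 3 skill gaps
--         if "programming" in skill.lower() or "coding" in skill.lower():
--             learning_paths.append(f"Learn {skill} through online courses and practice projects")
--         elif "design" in skill.lower():
--             learning_paths.append(
--                 f"Develop {skill} through design tools and portfolio building"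
--             )
--         elif "analysis" in skill.lower() or "data" in skill.lower():
--             learning_paths.append(
--                 f"Master {skill} through data analysis projects and certifications"
--             )
--         elif "management" in skill.lower() or "leadership" in skill.lower():
--             learning_paths.append(
--                 f"Build {skill} through leadership roles and management training"
--             )
--         else:
--             learning_paths.append(f"Develop {skill} through targeted learning and practice")
--
--     return learning_paths
-- ===== SOURCE B (Python) =====
-- # Recursive, cons-building re-implementation: a flat keyword->category index map plus
-- # parallel prefix/suffix arrays replace the if/elif chain; recursion with a budget
-- # counter replaces the slice+accumulator loop.
--
-- KEYWORD_CATEGORY = [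
--     ("programming", 0), ("coding", 0),
--     ("design", 1),
--     ("analysis", 2), ("data", 2),
--     ("management", 3), ("leadership", 3),
-- ]
-- PREFIX = ["Learn ", "Develop ", "Master ", "Build ", "Develop "]
-- SUFFIX = [
--     " through online courses and practice projects",
--     " through design tools and portfolio building",
--     " through data analysis projects and certifications",
--     " through leadership roles and management training",
--     " through targeted learning and practice",
-- ]
--
--
-- def _render(skill):
--     low = skill.lower()
--     cat = next((c for kw, c in KEYWORD_CATEGORY if kw in low), 4)
--     return PREFIX[cat] + skill + SUFFIX[cat]
--
--
-- def _paths(skills, budget):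
--     if budget == 0 or not skills:
--         return []
--     return [_render(skills[0])] + _paths(skills[1:], budget - 1)
--
--
-- def _generate_learning_paths(skill_gaps, cluster_name):
--     """Generate learning paths for skill gaps."""
--     return _paths(skill_gaps, 3)
-- ===== Notes on version B (the rewrite author's own statement) =====
-- stated objective: alternative
-- what changed: Replaces the slice-plus-accumulator loop with an if/elif branch chain by a recursive cons-building traversal with a budget counter, and encodes the classification as a flat keyword-to-category-index map indexing parallel prefix/suffix template arrays.
import Mathlib
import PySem

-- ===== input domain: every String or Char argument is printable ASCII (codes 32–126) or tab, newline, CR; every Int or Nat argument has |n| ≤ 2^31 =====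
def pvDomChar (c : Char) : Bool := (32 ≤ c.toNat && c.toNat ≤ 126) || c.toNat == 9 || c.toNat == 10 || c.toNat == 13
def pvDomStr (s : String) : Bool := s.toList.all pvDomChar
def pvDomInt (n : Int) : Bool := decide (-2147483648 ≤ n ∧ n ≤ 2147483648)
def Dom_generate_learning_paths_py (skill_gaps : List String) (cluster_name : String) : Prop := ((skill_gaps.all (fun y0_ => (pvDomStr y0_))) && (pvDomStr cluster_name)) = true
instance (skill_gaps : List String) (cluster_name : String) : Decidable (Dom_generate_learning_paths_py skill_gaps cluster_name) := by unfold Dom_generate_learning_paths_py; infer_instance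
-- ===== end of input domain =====

-- B replaces the branch-chain accumulator loop by a recursive cons-building traversal
-- over a flat keyword->category index map with parallel template arrays (alternative decomposition).


-- ===== PORT A =====
-- Literal transliteration of A: accumulator loop over skill_gaps[:3] with the if/elif chain.
def generate_learning_paths_py (skill_gaps : List String) (cluster_name : String) : List String :=
  (PySem.List.slice skill_gaps none (some 3)).foldl (fun learning_paths skill =>
    if PySem.Str.isIn "programming" (PySem.Str.lower skill) || PySem.Str.isIn "coding" (PySem.Str.lower skill) then
      learning_paths ++ ["Learn " ++ skill ++ " through online courses and practice projects"]
    else if PySem.Str.isIn "design" (PySem.Str.lower skill) then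
      learning_paths ++ ["Develop " ++ skill ++ " through design tools and portfolio building"]
    else if PySem.Str.isIn "analysis" (PySem.Str.lower skill) || PySem.Str.isIn "data" (PySem.Str.lower skill) then
      learning_paths ++ ["Master " ++ skill ++ " through data analysis projects and certifications"]
    else if PySem.Str.isIn "management" (PySem.Str.lower skill) || PySem.Str.isIn "leadership" (PySem.Str.lower skill) then
      learning_paths ++ ["Build " ++ skill ++ " through leadership roles and management training"]
    else
      learning_paths ++ ["Develop " ++ skill ++ " through targeted learning and practice"]) []

-- ===== PORT B =====
-- Port of B: flat keyword -> category-index map, parallel prefix/suffix arrays,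
-- recursive cons-building traversal with a budget counter.
def pvKeywordCat : List (String × Nat) :=
  [("programming", 0), ("coding", 0), ("design", 1), ("analysis", 2), ("data", 2),
   ("management", 3), ("leadership", 3)]

def pvPrefix : List String := ["Learn ", "Develop ", "Master ", "Build ", "Develop "]

def pvSuffix : List String :=
  [" through online courses and practice projects",
   " through design tools and portfolio building",
   " through data analysis projects and certifications",
   " through leadership roles and management training",
   " through targeted learning and practice"]

-- PREFIX[cat] / SUFFIX[cat]: cat is always 0..4, so the getD default is unreachable.
def pvRender (skill : String) : String :=
  let low := PySem.Str.lower skill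
  let cat : Nat :=
    match pvKeywordCat.find? (fun p => PySem.Str.isIn p.1 low) with
    | some p => p.2
    | none => 4
  pvPrefix.getD cat "" ++ skill ++ pvSuffix.getD cat ""

def pvPaths : List String → Nat → List String
  | _, 0 => []
  | [], _ => []
  | s :: rest, Nat.succ b => pvRender s :: pvPaths rest b

def generate_learning_paths_py_alt (skill_gaps : List String) (cluster_name : String) : List String :=
  pvPaths skill_gaps 3

-- ===== PRECONDITION & SPEC =====
def Spec_generate_learning_paths_py (skill_gaps : List String) (cluster_name : String) (out : List String) : Prop := out = generate_learning_paths_py_alt skill_gaps cluster_name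
instance (skill_gaps : List String) (cluster_name : String) (out : List String) : Decidable (Spec_generate_learning_paths_py skill_gaps cluster_name out) := by unfold Spec_generate_learning_paths_py; infer_instance

-- ===== CLAIM =====
def Claim_equal_generate_learning_paths_py : Prop := ∀ (skill_gaps : List String) (cluster_name : String), Dom_generate_learning_paths_py skill_gaps cluster_name → Spec_generate_learning_paths_py skill_gaps cluster_name (generate_learning_paths_py skill_gaps cluster_name)

-- ===== LEMMAS AND PROOFS =====
-- B's recursion equals a map over take n.
theorem pv_paths_eq (l : List String) : ∀ n, pvPaths l n = (l.take n).map pvRender := by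
  induction l with
  | nil => intro n; cases n <;> simp [pvPaths]
  | cons x xs ih => intro n; cases n <;> simp [pvPaths, ih]

-- find? over a 7-element literal list as a branch chain.
theorem pv_find7 {α : Type} (p : α → Bool) (a b c d e f g : α) :
    List.find? p [a, b, c, d, e, f, g] =
      if p a then some a else if p b then some b else if p c then some c
      else if p d then some d else if p e then some e else if p f then some f
      else if p g then some g else none := by
  by_cases ha : p a <;> by_cases hb : p b <;> by_cases hc : p c <;> by_cases hd : p d <;>
  by_cases he : p e <;> by_cases hf : p f <;> by_cases hg : p g <;>
    simp [List.find?_cons_of_pos, List.find?_cons_of_neg, ha, hb, hc, hd, he, hf, hg]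

-- Per-skill agreement: A's if/elif chain produces exactly pvRender skill.
theorem pv_body_eq (skill : String) :
    (if PySem.Str.isIn "programming" (PySem.Str.lower skill) || PySem.Str.isIn "coding" (PySem.Str.lower skill) then
      "Learn " ++ skill ++ " through online courses and practice projects"
    else if PySem.Str.isIn "design" (PySem.Str.lower skill) then
      "Develop " ++ skill ++ " through design tools and portfolio building"
    else if PySem.Str.isIn "analysis" (PySem.Str.lower skill) || PySem.Str.isIn "data" (PySem.Str.lower skill) then
      "Master " ++ skill ++ " through data analysis projects and certifications"
    else if PySem.Str.isIn "management" (PySem.Str.lower skill) || PySem.Str.isIn "leadership" (PySem.Str.lower skill) then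
      "Build " ++ skill ++ " through leadership roles and management training"
    else
      "Develop " ++ skill ++ " through targeted learning and practice") = pvRender skill := by
  cases h1 : PySem.Str.isIn "programming" (PySem.Str.lower skill) <;>
  cases h2 : PySem.Str.isIn "coding" (PySem.Str.lower skill) <;>
  cases h3 : PySem.Str.isIn "design" (PySem.Str.lower skill) <;>
  cases h4 : PySem.Str.isIn "analysis" (PySem.Str.lower skill) <;>
  cases h5 : PySem.Str.isIn "data" (PySem.Str.lower skill) <;>
  cases h6 : PySem.Str.isIn "management" (PySem.Str.lower skill) <;>
  cases h7 : PySem.Str.isIn "leadership" (PySem.Str.lower skill) <;>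
    simp only [pvRender, pvKeywordCat, pvPrefix, pvSuffix, pv_find7,
      h1, h2, h3, h4, h5, h6, h7, Bool.or_false, Bool.or_true, Bool.or_self, if_true] <;> rfl

-- A's accumulator loop equals a map of pvRender, for any accumulator.
theorem pv_fold (l : List String) (acc : List String) :
    l.foldl (fun learning_paths skill =>
      if PySem.Str.isIn "programming" (PySem.Str.lower skill) || PySem.Str.isIn "coding" (PySem.Str.lower skill) then
        learning_paths ++ ["Learn " ++ skill ++ " through online courses and practice projects"]
      else if PySem.Str.isIn "design" (PySem.Str.lower skill) then
        learning_paths ++ ["Develop " ++ skill ++ " through design tools and portfolio building"]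
      else if PySem.Str.isIn "analysis" (PySem.Str.lower skill) || PySem.Str.isIn "data" (PySem.Str.lower skill) then
        learning_paths ++ ["Master " ++ skill ++ " through data analysis projects and certifications"]
      else if PySem.Str.isIn "management" (PySem.Str.lower skill) || PySem.Str.isIn "leadership" (PySem.Str.lower skill) then
        learning_paths ++ ["Build " ++ skill ++ " through leadership roles and management training"]
      else
        learning_paths ++ ["Develop " ++ skill ++ " through targeted learning and practice"]) acc =
    acc ++ l.map pvRender := by
  induction l generalizing acc with
  | nil => simp
  | cons x xs ih =>
      rw [List.foldl_cons, ih]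
      have hstep : ∀ (a : List String),
          (if PySem.Str.isIn "programming" (PySem.Str.lower x) || PySem.Str.isIn "coding" (PySem.Str.lower x) then
            a ++ ["Learn " ++ x ++ " through online courses and practice projects"]
          else if PySem.Str.isIn "design" (PySem.Str.lower x) then
            a ++ ["Develop " ++ x ++ " through design tools and portfolio building"]
          else if PySem.Str.isIn "analysis" (PySem.Str.lower x) || PySem.Str.isIn "data" (PySem.Str.lower x) then
            a ++ ["Master " ++ x ++ " through data analysis projects and certifications"]
          else if PySem.Str.isIn "management" (PySem.Str.lower x) || PySem.Str.isIn "leadership" (PySem.Str.lower x) then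
            a ++ ["Build " ++ x ++ " through leadership roles and management training"]
          else
            a ++ ["Develop " ++ x ++ " through targeted learning and practice"]) = a ++ [pvRender x] := by
        intro a; rw [← pv_body_eq x]; split_ifs <;> rfl
      rw [hstep, List.map_cons, List.append_assoc, List.singleton_append]

-- ===== VERDICT =====
theorem generate_learning_paths_py_spec : Claim_equal_generate_learning_paths_py := by
  intro skill_gaps cluster_name _
  unfold Spec_generate_learning_paths_py generate_learning_paths_py generate_learning_paths_py_alt
  rw [PySem.List.slice_to skill_gaps (by norm_num), pv_fold, List.nil_append, pv_paths_eq]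
  rfl
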